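-- pv_equiv track=rewrite | github.com/beungz/food-recommender | scripts/model.py | combine_recommendations
-- ===== SOURCE A (Python) =====
-- def combine_recommendations(rule_based, model_based, k=50):
--     '''
--     Alternating rule-based and model-based recommendations, while preserving uniqueness and limiting to k items.
--     '''
--     seen = set()
--     combined = []
--
--     # Fill in the list from rule based and model based, in an alternating pattern
--     for r, m in zip(rule_based, model_based):
--         for item in (r, m):
--             if item not in seen:
--                 combined.append(item)
--                 seen.add(item)
--                 if len(combined) == k:
--                     return combined
--
--     # If still not enough, fill from remaining items
--     for remaining in rule_based[len(combined)//2:] + model_based[len(combined)//2:]: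
--         if remaining not in seen:
--             combined.append(remaining)
--             seen.add(remaining)
--             if len(combined) == k:
--                 break
--
--     return combined
-- ===== SOURCE B (Python) =====
-- def combine_recommendations(rule_based, model_based, k=50):
--     '''
--     Alternating rule-based and model-based recommendations, while preserving uniqueness and limiting to k items.
--     '''
--     n = min(len(rule_based), len(model_based))
--     candidates = []
--     for r, m in zip(rule_based, model_based):
--         candidates.append(r)
--         candidates.append(m)
--     candidates += rule_based[n:]
--     candidates += model_based[n:]
--
--     seen = set()
--     result = []
--     for item in candidates:
--         if item not in seen:
--             seen.add(item)
--             result.append(item)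
--             if len(result) == k:
--                 break
--     return result
-- ===== Notes on version B (the rewrite author's own statement) =====
-- stated objective: simpler
-- what changed: B first builds the whole ordered candidate list (zip-interleaved pairs plus both tails from n = min(len)) and then runs one dedup-and-limit pass with a seen set, instead of A's inline-dedup interleave with an early return plus a second fill loop sliced from len(combined)//2.
import Mathlib
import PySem

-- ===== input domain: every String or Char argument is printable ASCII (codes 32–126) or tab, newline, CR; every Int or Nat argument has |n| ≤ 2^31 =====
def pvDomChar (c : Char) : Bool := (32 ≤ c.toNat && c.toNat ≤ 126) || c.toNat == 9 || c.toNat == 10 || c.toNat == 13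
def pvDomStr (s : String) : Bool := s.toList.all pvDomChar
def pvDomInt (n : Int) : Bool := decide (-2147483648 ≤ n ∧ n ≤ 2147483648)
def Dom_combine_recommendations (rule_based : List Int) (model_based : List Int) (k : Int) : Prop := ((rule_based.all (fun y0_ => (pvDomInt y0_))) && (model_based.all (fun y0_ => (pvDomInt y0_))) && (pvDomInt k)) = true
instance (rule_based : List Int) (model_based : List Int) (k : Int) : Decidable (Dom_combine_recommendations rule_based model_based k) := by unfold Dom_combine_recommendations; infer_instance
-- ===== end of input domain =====

-- B builds the full candidate sequence first (interleave + tails) and runs one dedup-and-limit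
-- pass over it, replacing A's inline-dedup interleave with early return plus its slice-offset
-- second fill loop; objective: simpler.

-- ===== PORT A =====
-- inner 'for item in (r, m)' body: skip if seen, else append+add, early 'return combined' at k
def pvStepA (item : Int) (seen : PySem.Set Int) (combined : List Int) (k : Int) :
    (List Int) ⊕ (PySem.Set Int × List Int) :=
  if item ∈ seen then .inr (seen, combined)
  else
    let combined' := combined ++ [item]
    if (combined'.length : Int) = k then .inl combined'
    else .inr (PySem.Set.add seen item, combined')

-- 'for r, m in zip(rule_based, model_based)' with the possible early return
def pvLoop1A (ps : List (Int × Int)) (seen : PySem.Set Int) (combined : List Int) (k : Int) :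
    (List Int) ⊕ (PySem.Set Int × List Int) :=
  match ps with
  | [] => .inr (seen, combined)
  | (r, m) :: rest =>
    match pvStepA r seen combined k with
    | .inl res => .inl res
    | .inr (s1, c1) =>
      match pvStepA m s1 c1 k with
      | .inl res => .inl res
      | .inr (s2, c2) => pvLoop1A rest s2 c2 k

-- 'for remaining in …' second fill loop with break at k
def pvLoop2A (xs : List Int) (seen : PySem.Set Int) (combined : List Int) (k : Int) : List Int :=
  match xs with
  | [] => combined
  | x :: rest =>
    if x ∈ seen then pvLoop2A rest seen combined k
    else
      let combined' := combined ++ [x]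
      if (combined'.length : Int) = k then combined'
      else pvLoop2A rest (PySem.Set.add seen x) combined' k

def combine_recommendations (rule_based : List Int) (model_based : List Int) (k : Int) : List Int :=
  match pvLoop1A (rule_based.zip model_based) PySem.Set.empty [] k with
  | .inl res => res
  | .inr (seen, combined) =>
    let j : Int := PySem.Int.floordiv (combined.length : Int) 2
    pvLoop2A (PySem.List.slice rule_based (some j) none ++ PySem.List.slice model_based (some j) none)
      seen combined k

-- ===== PORT B =====
-- 'for r, m in zip(...): candidates.append(r); candidates.append(m)'
def pvInterleaveB (ps : List (Int × Int)) : List Int :=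
  ps.foldl (fun acc rm => acc ++ [rm.1, rm.2]) []

-- the single dedup-and-limit pass: skip seen, add+append, break at k
def pvDedupLimitB (xs : List Int) (seen : PySem.Set Int) (result : List Int) (k : Int) : List Int :=
  match xs with
  | [] => result
  | x :: rest =>
    if x ∈ seen then pvDedupLimitB rest seen result k
    else
      let seen' := PySem.Set.add seen x
      let result' := result ++ [x]
      if (result'.length : Int) = k then result'
      else pvDedupLimitB rest seen' result' k

def combine_recommendations_alt (rule_based : List Int) (model_based : List Int) (k : Int) : List Int :=
  let n := min rule_based.length model_based.length
  let candidates :=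
    pvInterleaveB (rule_based.zip model_based)
      ++ PySem.List.slice rule_based (some (n : Int)) none
      ++ PySem.List.slice model_based (some (n : Int)) none
  pvDedupLimitB candidates PySem.Set.empty [] k

-- ===== PRECONDITION & SPEC =====
def Spec_combine_recommendations (rule_based : List Int) (model_based : List Int) (k : Int) (out : List Int) : Prop := out = combine_recommendations_alt rule_based model_based k
instance (rule_based : List Int) (model_based : List Int) (k : Int) (out : List Int) : Decidable (Spec_combine_recommendations rule_based model_based k out) := by unfold Spec_combine_recommendations; infer_instance

-- ===== CLAIM (what is proved, stated in full; the proofs are below) =====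
def Claim_equal_combine_recommendations : Prop := ∀ (rule_based : List Int) (model_based : List Int) (k : Int), Dom_combine_recommendations rule_based model_based k → Spec_combine_recommendations rule_based model_based k (combine_recommendations rule_based model_based k)

-- ===== LEMMAS AND PROOFS =====

-- the interleaved flattening of the zipped pairs
def pvFlat (ps : List (Int × Int)) : List Int := ps.flatMap (fun p => [p.1, p.2])

theorem pvInterleaveB_eq (ps : List (Int × Int)) : pvInterleaveB ps = pvFlat ps := by
  simpa [pvInterleaveB, pvFlat] using PySem.List.foldl_append_eq_flatMap (fun p : Int × Int => [p.1, p.2]) ps []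

-- A's second loop is the same process as B's dedup pass
theorem pvLoop2A_eq (xs : List Int) (seen : PySem.Set Int) (c : List Int) (k : Int) :
    pvLoop2A xs seen c k = pvDedupLimitB xs seen c k := by
  induction xs generalizing seen c with
  | nil => rfl
  | cons x rest ih =>
    simp only [pvLoop2A, pvDedupLimitB]
    split_ifs <;> simp [ih]

-- dropping a block of already-seen items from the middle does not change the pass
theorem pvDedup_skip (l m r : List Int) (seen : PySem.Set Int) (c : List Int) (k : Int)
    (h : ∀ x ∈ m, x ∈ seen) :
    pvDedupLimitB (l ++ (m ++ r)) seen c k = pvDedupLimitB (l ++ r) seen c k := by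
  induction l generalizing seen c with
  | nil =>
    induction m generalizing seen c with
    | nil => rfl
    | cons y m' ihm =>
      have hy : y ∈ seen := h y (by simp)
      simp only [List.nil_append, List.cons_append, pvDedupLimitB, if_pos hy]
      exact ihm seen c (fun x hx => h x (by simp [hx]))
  | cons a l' ihl =>
    simp only [List.cons_append, pvDedupLimitB]
    split_ifs with h1 h2
    · exact ihl seen c h
    · rfl
    · exact ihl _ _ (fun x hx => (PySem.Set.mem_add _ _ _).2 (Or.inl (h x hx)))


theorem pvStepA_inl (item : Int) (s : PySem.Set Int) (c : List Int) (k : Int) (res : List Int)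
    (h : pvStepA item s c k = .inl res) (rest : List Int) :
    pvDedupLimitB (item :: rest) s c k = res := by
  simp only [pvStepA] at h
  split_ifs at h with h1 h2
  · cases h
    have h2' : (c.length : Int) + 1 = k := by simpa using h2
    simp [pvDedupLimitB, if_neg h1, h2']

theorem pvStepA_inr (item : Int) (s : PySem.Set Int) (c : List Int) (k : Int)
    (s' : PySem.Set Int) (c' : List Int) (h : pvStepA item s c k = .inr (s', c')) :
    (∀ rest, pvDedupLimitB (item :: rest) s c k = pvDedupLimitB rest s' c' k)
      ∧ (∀ x, x ∈ s → x ∈ s') ∧ item ∈ s' ∧ c'.length ≤ c.length + 1 := by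
  simp only [pvStepA] at h
  split_ifs at h with h1 h2
  · cases h
    exact ⟨fun rest => by simp [pvDedupLimitB, h1], fun x hx => hx, h1, by omega⟩
  · cases h
    have h2' : ¬ ((c.length : Int) + 1 = k) := by simpa using h2
    refine ⟨fun rest => by simp [pvDedupLimitB, h1, h2'], ?_, ?_, by simp⟩
    · exact fun x hx => (PySem.Set.mem_add _ _ _).2 (Or.inl hx)
    · exact (PySem.Set.mem_add _ _ _).2 (Or.inr rfl)

theorem pvLoop1A_inl (ps : List (Int × Int)) (s : PySem.Set Int) (c : List Int) (k : Int)
    (res : List Int) (h : pvLoop1A ps s c k = .inl res) (rest : List Int) :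
    pvDedupLimitB (pvFlat ps ++ rest) s c k = res := by
  induction ps generalizing s c with
  | nil => cases h
  | cons p rest' ih =>
    obtain ⟨r, m⟩ := p
    simp only [pvLoop1A] at h
    cases hr : pvStepA r s c k with
    | inl res1 =>
      rw [hr] at h; dsimp only at h; injection h with h; subst h
      simpa [pvFlat] using pvStepA_inl r s c k _ hr (m :: (pvFlat rest' ++ rest))
    | inr pr =>
      obtain ⟨s1, c1⟩ := pr
      rw [hr] at h; dsimp only at h
      have e1 := (pvStepA_inr r s c k s1 c1 hr).1
      cases hm : pvStepA m s1 c1 k with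
      | inl res2 =>
        rw [hm] at h; dsimp only at h; injection h with h; subst h
        have e2 := pvStepA_inl m s1 c1 k _ hm (pvFlat rest' ++ rest)
        simpa [pvFlat, e1] using e2
      | inr pr2 =>
        obtain ⟨s2, c2⟩ := pr2
        rw [hm] at h; dsimp only at h
        have e2 := (pvStepA_inr m s1 c1 k s2 c2 hm).1
        simpa [pvFlat, e1, e2] using ih s2 c2 h

theorem pvLoop1A_inr (ps : List (Int × Int)) (s : PySem.Set Int) (c : List Int) (k : Int)
    (s' : PySem.Set Int) (c' : List Int) (h : pvLoop1A ps s c k = .inr (s', c')) :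
    (∀ rest, pvDedupLimitB (pvFlat ps ++ rest) s c k = pvDedupLimitB rest s' c' k)
      ∧ (∀ x, x ∈ s → x ∈ s') ∧ (∀ x ∈ pvFlat ps, x ∈ s')
      ∧ c'.length ≤ c.length + 2 * ps.length := by
  induction ps generalizing s c with
  | nil =>
    simp only [pvLoop1A] at h
    injection h with h
    injection h with h1 h2
    subst h1; subst h2
    exact ⟨fun rest => by simp [pvFlat], fun x hx => hx, by simp [pvFlat], by omega⟩
  | cons p rest' ih =>
    obtain ⟨r, m⟩ := p
    simp only [pvLoop1A] at h
    cases hr : pvStepA r s c k with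
    | inl res1 => rw [hr] at h; dsimp only at h; cases h
    | inr pr =>
      obtain ⟨s1, c1⟩ := pr
      rw [hr] at h; dsimp only at h
      obtain ⟨e1, mono1, memr, len1⟩ := pvStepA_inr r s c k s1 c1 hr
      cases hm : pvStepA m s1 c1 k with
      | inl res2 => rw [hm] at h; dsimp only at h; cases h
      | inr pr2 =>
        obtain ⟨s2, c2⟩ := pr2
        rw [hm] at h; dsimp only at h
        obtain ⟨e2, mono2, memm, len2⟩ := pvStepA_inr m s1 c1 k s2 c2 hm
        obtain ⟨e3, mono3, mem3, len3⟩ := ih s2 c2 h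
        refine ⟨fun rest => by simpa [pvFlat, e1, e2] using e3 rest,
          fun x hx => mono3 x (mono2 x (mono1 x hx)), ?_, by simp; omega⟩
        intro x hx
        simp only [pvFlat, List.flatMap_cons, List.cons_append, List.nil_append,
          List.mem_cons, List.mem_append] at hx
        rcases hx with hx | hx | hx
        · exact mono3 x (mono2 x (hx ▸ memr))
        · exact mono3 x (hx ▸ memm)
        · exact mem3 x (by simpa [pvFlat] using hx)

theorem pv_mem_flat_left (rb mb : List Int) (x : Int)
    (h : x ∈ rb.take (rb.zip mb).length) : x ∈ pvFlat (rb.zip mb) := by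
  induction rb generalizing mb with
  | nil => simp at h
  | cons a rb' ih =>
    cases mb with
    | nil => simp at h
    | cons b mb' =>
      simp only [List.zip_cons_cons, List.length_cons, List.take_succ_cons, List.mem_cons] at h
      rcases h with h | h
      · simp [pvFlat, h]
      · have := ih mb' h
        simp only [pvFlat, List.zip_cons_cons, List.flatMap_cons, List.cons_append,
          List.nil_append, List.mem_cons] at this ⊢
        tauto

theorem pv_mem_flat_right (rb mb : List Int) (x : Int)
    (h : x ∈ mb.take (rb.zip mb).length) : x ∈ pvFlat (rb.zip mb) := by
  induction rb generalizing mb with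
  | nil => simp [List.zip] at h
  | cons a rb' ih =>
    cases mb with
    | nil => simp at h
    | cons b mb' =>
      simp only [List.zip_cons_cons, List.length_cons, List.take_succ_cons, List.mem_cons] at h
      rcases h with h | h
      · simp [pvFlat, h]
      · have := ih mb' h
        simp only [pvFlat, List.zip_cons_cons, List.flatMap_cons, List.cons_append,
          List.nil_append, List.mem_cons] at this ⊢
        tauto

-- ===== VERDICT (by name: the statement is the Claim_ definition above) =====
theorem combine_recommendations_spec : Claim_equal_combine_recommendations := by
  intro rb mb k _
  unfold Spec_combine_recommendations combine_recommendations combine_recommendations_alt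
  rw [pvInterleaveB_eq]
  have hn : (rb.zip mb).length = min rb.length mb.length := List.length_zip
  set n : Nat := min rb.length mb.length with hndef
  rcases h : pvLoop1A (rb.zip mb) PySem.Set.empty [] k with res | ⟨s', c'⟩
  · dsimp only
    have e := pvLoop1A_inl _ _ _ _ _ h
      (PySem.List.slice rb (some (n : Int)) none ++ PySem.List.slice mb (some (n : Int)) none)
    rw [← List.append_assoc] at e
    exact e.symm
  · dsimp only
    obtain ⟨e3, _, mem3, len3⟩ := pvLoop1A_inr _ _ _ _ _ _ h
    rw [hn] at len3
    simp only [List.length_nil, Nat.zero_add] at len3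
    -- the slice offset
    set j : Nat := c'.length / 2 with hjdef
    have hj : (PySem.Int.floordiv (c'.length : Int) 2) = (j : Int) :=
      PySem.Int.floordiv_natCast c'.length 2
    have hjn : j ≤ n := by omega
    have hnr : n ≤ rb.length := by omega
    have hnm : n ≤ mb.length := by omega
    rw [hj, PySem.List.slice_from_natCast, PySem.List.slice_from_natCast,
      PySem.List.slice_from_natCast, PySem.List.slice_from_natCast]
    -- split each drop at n
    have hsplit : ∀ (l : List Int), n ≤ l.length →
        l.drop j = (l.take n).drop j ++ l.drop n := by
      intro l hl
      have hlen : (l.take n).length = n := by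
        simp [List.length_take]; omega
      conv_lhs => rw [← List.take_append_drop n l]
      rw [List.drop_append_of_le_length (by rw [hlen]; exact hjn)]
    rw [pvLoop2A_eq, hsplit rb hnr, hsplit mb hnm]
    have hmemr : ∀ x ∈ (rb.take n).drop j, x ∈ s' := by
      intro x hx
      exact mem3 x (pv_mem_flat_left rb mb x (by rw [hn]; exact List.mem_of_mem_drop hx))
    have hmemm : ∀ x ∈ (mb.take n).drop j, x ∈ s' := by
      intro x hx
      exact mem3 x (pv_mem_flat_right rb mb x (by rw [hn]; exact List.mem_of_mem_drop hx))
    calc pvDedupLimitB (((rb.take n).drop j ++ rb.drop n) ++ ((mb.take n).drop j ++ mb.drop n)) s' c' k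
        = pvDedupLimitB ([] ++ ((rb.take n).drop j ++ (rb.drop n ++ ((mb.take n).drop j ++ mb.drop n)))) s' c' k := by
          simp [List.append_assoc]
      _ = pvDedupLimitB ([] ++ (rb.drop n ++ ((mb.take n).drop j ++ mb.drop n))) s' c' k :=
          pvDedup_skip [] _ _ s' c' k hmemr
      _ = pvDedupLimitB (rb.drop n ++ ((mb.take n).drop j ++ mb.drop n)) s' c' k := by simp
      _ = pvDedupLimitB (rb.drop n ++ mb.drop n) s' c' k :=
          pvDedup_skip (rb.drop n) _ _ s' c' k hmemm
      _ = pvDedupLimitB ((pvFlat (rb.zip mb) ++ rb.drop n) ++ mb.drop n) PySem.Set.empty [] k := by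
          rw [List.append_assoc]
          exact (e3 _).symm
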